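-- pv_equiv track=rewrite | github.com/ManhNgocNguyen/Thuat-Toan-ATTT | bai_20.py | find_a_b
-- ===== SOURCE A (Python) =====
-- def gcd(a, b):
--     if b == 0:
--         return a
--     return gcd(b, a % b)
--
-- def find_a_b(m, n, d):
--     arr = []
--     for i in range(m+1, n):
--         for j in range(m+1, n):
--             tmp = []
--             if gcd(i, j) == d and i < j:
--                 tmp.append(i)
--                 tmp.append(j)
--                 arr.append(tmp)
--     return arr
-- ===== SOURCE B (Python) =====
-- def gcd(a, b):
--     if b == 0:
--         return a
--     return gcd(b, a % b)
--
-- def find_a_b(m, n, d):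
--     # Enumerate only multiples of |d| in (m, n), pair them in ascending order.
--     res = []
--     if d == 0:
--         return res
--     k = d if d > 0 else -d
--     start = -(-(m + 1) // k) * k          # smallest multiple of k that is >= m+1
--     ms = list(range(start, n, k))
--     while ms:
--         i = ms[0]
--         ms = ms[1:]
--         for j in ms:
--             if gcd(i, j) == d:
--                 res.append([i, j])
--     return res
-- ===== Notes on version B (the rewrite author's own statement) =====
-- stated objective: alternative
-- what changed: Instead of testing gcd on every (i, j) pair of the full range with an i<j filter, B enumerates only the multiples of |d| in (m, n) (any pair with gcd equal to d consists of multiples of d) and pairs each with the remaining suffix in ascending order.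
import Mathlib
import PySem

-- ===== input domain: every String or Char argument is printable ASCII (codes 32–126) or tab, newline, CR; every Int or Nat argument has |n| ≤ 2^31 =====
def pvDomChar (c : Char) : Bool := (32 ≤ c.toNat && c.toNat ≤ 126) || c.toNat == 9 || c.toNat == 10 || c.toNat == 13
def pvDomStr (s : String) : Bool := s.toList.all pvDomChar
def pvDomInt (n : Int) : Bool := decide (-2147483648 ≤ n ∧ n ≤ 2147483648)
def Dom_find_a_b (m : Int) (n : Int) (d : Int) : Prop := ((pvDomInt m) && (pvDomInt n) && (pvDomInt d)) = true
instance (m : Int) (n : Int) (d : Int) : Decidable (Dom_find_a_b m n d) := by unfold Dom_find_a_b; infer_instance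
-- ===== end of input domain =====

-- B enumerates only the multiples of |d| in (m, n) and pairs them in ascending order,
-- instead of A's gcd test on every (i, j) pair of the full range (objective: alternative).

-- ===== PORT A =====
-- helper 'gcd' of Source A (recursive Euclid with Python's floor-mod; Source B defines the same helper)
def pygcd (a b : Int) : Int :=
  if b = 0 then a else pygcd b (PySem.Int.mod a b)
termination_by b.natAbs
decreasing_by
  rcases lt_trichotomy b 0 with hb | hb | hb
  · have h1 := PySem.Int.mod_neg_bounds a hb
    omega
  · simp [hb] at *
  · have h1 := PySem.Int.mod_nonneg a hb
    have h2 := PySem.Int.mod_lt a hb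
    omega

-- 'tmp = []; tmp.append(i); tmp.append(j)' builds the literal [i, j]
def find_a_b (m : Int) (n : Int) (d : Int) : List (List Int) :=
  (PySem.List.pyRange (m + 1) n 1).foldl (fun arr i =>
    (PySem.List.pyRange (m + 1) n 1).foldl (fun arr2 j =>
      if pygcd i j = d ∧ i < j then arr2 ++ [[i, j]] else arr2) arr) []

-- ===== PORT B =====
-- the 'while ms:' loop of Source B: i = ms[0]; ms = ms[1:]; inner 'for j in ms'
def pairsLoop (d : Int) : List Int → List (List Int) → List (List Int)
  | [], res => res
  | i :: rest, res =>
      pairsLoop d rest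
        (rest.foldl (fun r j => if pygcd i j = d then r ++ [[i, j]] else r) res)

def find_a_b_alt (m : Int) (n : Int) (d : Int) : List (List Int) :=
  if d = 0 then []
  else
    let k := if d > 0 then d else -d
    let start := -(PySem.Int.floordiv (-(m + 1)) k) * k
    pairsLoop d (PySem.List.pyRange start n k) []

-- ===== PRECONDITION & SPEC =====
def Spec_find_a_b (m : Int) (n : Int) (d : Int) (out : List (List Int)) : Prop := out = find_a_b_alt m n d
instance (m : Int) (n : Int) (d : Int) (out : List (List Int)) : Decidable (Spec_find_a_b m n d out) := by unfold Spec_find_a_b; infer_instance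

-- ===== CLAIM (what is proved, stated in full; the proofs are below) =====
def Claim_equal_find_a_b : Prop := ∀ (m : Int) (n : Int) (d : Int), Dom_find_a_b m n d → Spec_find_a_b m n d (find_a_b m n d)

-- ===== LEMMAS AND PROOFS =====

-- Characterisation of Source A's gcd: for j ≠ 0 it returns sign(j) * gcd(|i|, |j|).
lemma pygcd_char_aux : ∀ (N : Nat) (b a : Int), b.natAbs ≤ N → b ≠ 0 →
    pygcd a b = (if 0 < b then (1 : Int) else -1) * Int.gcd a b := by
  intro N
  induction N with
  | zero => intro b a h hb; omega
  | succ N ih =>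
    intro b a hN hb
    rw [pygcd, if_neg hb]
    by_cases hm : PySem.Int.mod a b = 0
    · rw [hm, pygcd, if_pos rfl]
      have hdvd : b ∣ a := (PySem.Int.mod_eq_zero_iff_dvd a b).mp hm
      have hg : Int.gcd a b = b.natAbs := Int.gcd_eq_natAbs_right_iff_dvd.mpr hdvd
      rw [hg]
      rcases lt_or_gt_of_ne hb with h | h
      · rw [if_neg (by omega)]; omega
      · rw [if_pos h]; omega
    · have hlt : (PySem.Int.mod a b).natAbs < b.natAbs := by
        rcases lt_trichotomy b 0 with h | h | h
        · have := PySem.Int.mod_neg_bounds a h; omega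
        · exact absurd h hb
        · have h1 := PySem.Int.mod_nonneg a h
          have h2 := PySem.Int.mod_lt a h
          omega
      rw [ih (PySem.Int.mod a b) b (by omega) hm]
      have hgcd : Int.gcd b (PySem.Int.mod a b) = Int.gcd a b := by
        have h := PySem.Int.floordiv_mul_add_mod a b
        have hrep : PySem.Int.mod a b = a - b * PySem.Int.floordiv a b := by
          linear_combination h
        rw [hrep, Int.gcd_sub_mul_left_right b a (PySem.Int.floordiv a b), Int.gcd_comm]
      have hsign : (0 < PySem.Int.mod a b) ↔ (0 < b) := by
        rcases lt_trichotomy b 0 with h | h | h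
        · have := PySem.Int.mod_neg_bounds a h; constructor <;> intro <;> omega
        · exact absurd h hb
        · have h1 := PySem.Int.mod_nonneg a h
          constructor <;> intro <;> omega
      rw [hgcd]
      by_cases hpos : 0 < b
      · rw [if_pos hpos, if_pos (hsign.mpr hpos)]
      · rw [if_neg hpos, if_neg (fun hc => hpos (hsign.mp hc))]

lemma pygcd_char (a b : Int) (hb : b ≠ 0) :
    pygcd a b = (if 0 < b then (1 : Int) else -1) * Int.gcd a b :=
  pygcd_char_aux b.natAbs b a le_rfl hb

lemma pygcd_eq_zero (i j : Int) (h : pygcd i j = 0) : i = 0 ∧ j = 0 := by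
  by_cases hj : j = 0
  · subst hj
    rw [pygcd, if_pos rfl] at h
    exact ⟨h, rfl⟩
  · rw [pygcd_char i j hj] at h
    have : Int.gcd i j = 0 := by
      by_cases hp : 0 < j <;> simp [hp] at h <;> omega
    have := Int.gcd_eq_zero_iff.mp (by exact_mod_cast this)
    exact absurd this.2 hj

lemma pygcd_dvd (i j dd : Int) (h : pygcd i j = dd) : dd ∣ i ∧ dd ∣ j := by
  by_cases hj : j = 0
  · subst hj
    rw [pygcd, if_pos rfl] at h
    exact ⟨h ▸ dvd_refl i, dvd_zero _⟩
  · rw [pygcd_char i j hj] at h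
    have hdi : (Int.gcd i j : Int) ∣ i := Int.gcd_dvd_left i j
    have hdj : (Int.gcd i j : Int) ∣ j := Int.gcd_dvd_right i j
    by_cases hp : 0 < j <;> simp [hp] at h <;> subst h
    · exact ⟨hdi, hdj⟩
    · exact ⟨(neg_dvd).mpr hdi, (neg_dvd).mpr hdj⟩

-- two strictly increasing lists with the same members are equal
lemma eq_of_pairwise_lt_of_mem_iff (l₁ l₂ : List Int)
    (h₁ : l₁.Pairwise (· < ·)) (h₂ : l₂.Pairwise (· < ·))
    (hm : ∀ x, x ∈ l₁ ↔ x ∈ l₂) : l₁ = l₂ := by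
  have hn₁ : l₁.Nodup := h₁.imp (fun h => ne_of_lt h)
  have hn₂ : l₂.Nodup := h₂.imp (fun h => ne_of_lt h)
  have hp : l₁.Perm l₂ := (List.perm_ext_iff_of_nodup hn₁ hn₂).mpr hm
  calc l₁ = PySem.List.sorted l₂ (fun x => x) :=
        (PySem.List.sorted_eq_of_perm_of_pairwise_lt l₂ l₁ (fun x => x) hp h₁).symm
    _ = l₂ := PySem.List.sorted_eq_of_perm_of_pairwise_lt l₂ l₂ (fun x => x) (List.Perm.refl _) h₂

lemma pairwise_pyRange_pos (a b k : Int) (hk : 0 < k) :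
    (PySem.List.pyRange a b k).Pairwise (· < ·) := by
  rw [PySem.List.pyRange_of_pos a b hk]
  refine List.Pairwise.map _ (fun x y hxy => ?_) (List.pairwise_lt_range)
  have : (x : Int) < (y : Int) := by exact_mod_cast hxy
  nlinarith

-- the multiples list of Source B: range(-(-(lo)//k)*k, n, k) holds exactly the multiples of k in [lo, n)
lemma mem_mult (lo n k x : Int) (hk : 0 < k) :
    x ∈ PySem.List.pyRange (-(PySem.Int.floordiv (-lo) k) * k) n k ↔
      (lo ≤ x ∧ x < n ∧ k ∣ x) := by
  set q : Int := -(PySem.Int.floordiv (-lo) k) with hq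
  have hb : (q - 1) * k < lo ∧ lo ≤ q * k :=
    (PySem.Int.neg_floordiv_neg_eq_iff_of_pos hk).mp rfl
  rw [PySem.List.mem_pyRange_iff_of_pos hk]
  constructor
  · rintro ⟨h1, h2, c, hc⟩
    exact ⟨le_trans hb.2 h1, h2, ⟨q + c, by linear_combination hc⟩⟩
  · rintro ⟨h1, h2, c, hc⟩
    refine ⟨?_, h2, ⟨c - q, by linear_combination hc⟩⟩
    have h3 : (q - 1) * k < k * c := by rw [← hc]; exact lt_of_lt_of_le hb.1 h1
    have h4 : q ≤ c := by nlinarith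
    have h5 : q * k ≤ c * k := mul_le_mul_of_nonneg_right h4 hk.le
    rw [hc, mul_comm k c]
    exact h5

-- a flatMap may be restricted to the elements where the body is nonempty
lemma flatMap_eq_flatMap_filter {α β : Type} (l : List α) (p : α → Bool) (g : α → List β)
    (h : ∀ x ∈ l, p x = false → g x = []) :
    l.flatMap g = (l.filter p).flatMap g := by
  induction l with
  | nil => rfl
  | cons x xs ih =>
    rw [List.flatMap_cons, List.filter_cons]
    by_cases hx : p x = true
    · rw [if_pos hx, List.flatMap_cons, ih (fun y hy => h y (List.mem_cons_of_mem x hy))]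
    · rw [if_neg hx, h x List.mem_cons_self (Bool.eq_false_iff.mpr hx),
        List.nil_append, ih (fun y hy => h y (List.mem_cons_of_mem x hy))]

lemma flatMap_congr_mem {α β : Type} (l : List α) (g g' : α → List β)
    (h : ∀ x ∈ l, g x = g' x) : l.flatMap g = l.flatMap g' := by
  induction l with
  | nil => rfl
  | cons x xs ih =>
    rw [List.flatMap_cons, List.flatMap_cons, h x List.mem_cons_self,
      ih (fun y hy => h y (List.mem_cons_of_mem x hy))]

-- the pair lists produced by B's while-loop, written structurally
def tailsFlat (d : Int) : List Int → List (List Int)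
  | [] => []
  | i :: rest =>
      (rest.filter (fun j => decide (pygcd i j = d))).map (fun j => [i, j]) ++ tailsFlat d rest

lemma pairsLoop_eq (d : Int) : ∀ (ms : List Int) (res : List (List Int)),
    pairsLoop d ms res = res ++ tailsFlat d ms := by
  intro ms
  induction ms with
  | nil => intro res; simp [pairsLoop, tailsFlat]
  | cons i rest ih =>
    intro res
    rw [pairsLoop, ih, PySem.List.foldl_append_ite (fun j => pygcd i j = d) (fun j => [i, j]),
      tailsFlat, List.append_assoc]

-- on a strictly increasing list, the suffix-pairing equals the i<j-filtered pairing
lemma tailsFlat_eq_flatMap (d : Int) : ∀ (M : List Int), M.Pairwise (· < ·) →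
    tailsFlat d M = M.flatMap (fun i =>
      (M.filter (fun j => decide (pygcd i j = d ∧ i < j))).map (fun j => [i, j])) := by
  intro M
  induction M with
  | nil => intro _; rfl
  | cons i rest ih =>
    intro hp
    have hlt : ∀ j ∈ rest, i < j := (List.pairwise_cons.mp hp).1
    rw [tailsFlat, ih (List.pairwise_cons.mp hp).2, List.flatMap_cons]
    congr 1
    · congr 1
      rw [List.filter_cons]
      have hhead : decide (pygcd i i = d ∧ i < i) = false := by simp
      rw [hhead, if_neg (by simp)]
      exact List.filter_congr (fun j hj => by simp [hlt j hj])
    · refine flatMap_congr_mem _ _ _ (fun i' hi' => ?_)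
      congr 1
      rw [List.filter_cons]
      have hhead : decide (pygcd i' i = d ∧ i' < i) = false := by
        simp [not_lt.mpr (hlt i' hi').le]
      rw [hhead, if_neg (by simp)]

-- A as a flatMap of filters over the full range
lemma A_eq (m n d : Int) :
    find_a_b m n d = (PySem.List.pyRange (m + 1) n 1).flatMap (fun i =>
      ((PySem.List.pyRange (m + 1) n 1).filter
        (fun j => decide (pygcd i j = d ∧ i < j))).map (fun j => [i, j])) := by
  unfold find_a_b
  rw [PySem.List.foldl_congr_mem _ _
    (fun arr i => arr ++ ((PySem.List.pyRange (m + 1) n 1).filter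
      (fun j => decide (pygcd i j = d ∧ i < j))).map (fun j => [i, j])) _
    (fun acc i _ => PySem.List.foldl_append_ite (fun j => pygcd i j = d ∧ i < j) (fun j => [i, j]) _ acc)]
  rw [PySem.List.foldl_append_eq_flatMap, List.nil_append]

-- ===== VERDICT (by name: the statement is the Claim_ definition above) =====
theorem find_a_b_spec : Claim_equal_find_a_b := by
  intro m n d _
  unfold Spec_find_a_b
  by_cases hd : d = 0
  · subst hd
    rw [A_eq]
    unfold find_a_b_alt
    rw [if_pos rfl]
    refine List.flatMap_eq_nil_iff.mpr (fun i _ => ?_)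
    have hnil : (PySem.List.pyRange (m + 1) n 1).filter
        (fun j => decide (pygcd i j = 0 ∧ i < j)) = [] := by
      refine List.filter_eq_nil_iff.mpr (fun j _ => ?_)
      simp only [decide_eq_true_eq, not_and]
      intro hg
      obtain ⟨hi, hj⟩ := pygcd_eq_zero i j hg
      omega
    rw [hnil]
    rfl
  · have hk : (0 : Int) < if d > 0 then d else -d := by split <;> omega
    have hkd : ∀ x : Int, ((if d > 0 then d else -d) ∣ x) ↔ d ∣ x := by
      intro x; split
      · exact Iff.rfl
      · exact neg_dvd
    set k : Int := if d > 0 then d else -d with hkdef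
    set R : List Int := PySem.List.pyRange (m + 1) n 1 with hR
    set M : List Int := PySem.List.pyRange (-(PySem.Int.floordiv (-(m + 1)) k) * k) n k with hM
    have hMmem : ∀ x, x ∈ M ↔ (m + 1 ≤ x ∧ x < n ∧ d ∣ x) := by
      intro x
      rw [hM, mem_mult (m + 1) n k x hk]
      exact and_congr_right (fun _ => and_congr_right (fun _ => hkd x))
    have hRmem : ∀ x, x ∈ R ↔ (m + 1 ≤ x ∧ x < n) := fun x => PySem.List.mem_pyRange_one
    have hRp : R.Pairwise (· < ·) := by rw [hR]; exact PySem.List.pairwise_lt_pyRange_one _ _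
    have hMp : M.Pairwise (· < ·) := pairwise_pyRange_pos _ _ _ hk
    have hfilter : R.filter (fun x => decide (d ∣ x)) = M := by
      refine eq_of_pairwise_lt_of_mem_iff _ _ (hRp.filter _) hMp (fun x => ?_)
      rw [List.mem_filter, hMmem, hRmem]
      simp [and_assoc]
    calc find_a_b m n d
        = R.flatMap (fun i => (R.filter
            (fun j => decide (pygcd i j = d ∧ i < j))).map (fun j => [i, j])) := A_eq m n d
      _ = (R.filter (fun x => decide (d ∣ x))).flatMap (fun i => (R.filter
            (fun j => decide (pygcd i j = d ∧ i < j))).map (fun j => [i, j])) := by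
          refine flatMap_eq_flatMap_filter R _ _ (fun i _ hnd => ?_)
          have hnd' : ¬ d ∣ i := by simpa using hnd
          have hnil : R.filter (fun j => decide (pygcd i j = d ∧ i < j)) = [] := by
            refine List.filter_eq_nil_iff.mpr (fun j _ => ?_)
            simp only [decide_eq_true_eq]
            rintro ⟨hg, -⟩
            exact hnd' (pygcd_dvd i j d hg).1
          rw [hnil]
          rfl
      _ = M.flatMap (fun i => (R.filter
            (fun j => decide (pygcd i j = d ∧ i < j))).map (fun j => [i, j])) := by rw [hfilter]
      _ = M.flatMap (fun i => (M.filter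
            (fun j => decide (pygcd i j = d ∧ i < j))).map (fun j => [i, j])) := by
          refine flatMap_congr_mem _ _ _ (fun i _ => ?_)
          congr 1
          refine eq_of_pairwise_lt_of_mem_iff _ _ (hRp.filter _) (hMp.filter _) (fun j => ?_)
          rw [List.mem_filter, List.mem_filter, hRmem, hMmem]
          constructor
          · rintro ⟨⟨h1, h2⟩, h3⟩
            have hc := of_decide_eq_true h3
            exact ⟨⟨h1, h2, (pygcd_dvd i j d hc.1).2⟩, h3⟩
          · rintro ⟨⟨h1, h2, _⟩, h3⟩
            exact ⟨⟨h1, h2⟩, h3⟩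
      _ = tailsFlat d M := (tailsFlat_eq_flatMap d M hMp).symm
      _ = pairsLoop d M [] := (pairsLoop_eq d M []).symm
      _ = find_a_b_alt m n d := by
          unfold find_a_b_alt
          rw [if_neg hd]
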